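-- pv_equiv track=rewrite | github.com/khangdzox/Inference-Engine | cnf_helper.py | get_following_operand
-- ===== SOURCE A (Python) =====
-- def get_following_operand(sentence: list[str], index: int) -> tuple[int, int]:
--     """
--     Get the index of the operand following the operator at the given index.
--
--     Args:
--         sentence (`list[str]`): The sentence to check.
--         index (`int`): The index of the operator.
--
--     Raises:
--         `ValueError`: If the sentence is invalid.
--
--     Returns:
--         `tuple[int, int]`: The begin and end index of the operand following the operator.
--     """
--     # check if the operand starts with a '~'
--     # if it does, get the operand after the '~'
--     if sentence[index + 1] == '~':
--         _, end_after_not = get_following_operand(sentence, index + 1)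
--         return index + 1, end_after_not
--
--     # if the operand not start with a '(', then the operand is a single character
--     if sentence[index + 1] != '(':
--         return index + 1, index + 1
--
--     parenthesis_stack = []
--     # iterate forwards from the operator
--     for i in range(index + 1, len(sentence)):
--
--         # push and pop the parenthesis stack
--         if sentence[i] == '(':
--             parenthesis_stack.append(i)
--         elif sentence[i] == ')':
--             if len(parenthesis_stack) > 0:
--                 parenthesis_stack.pop()
--
--         # if the parenthesis stack is empty, then the whole operand has been found
--         if len(parenthesis_stack) == 0:
--             end = i
--             return index + 1, end
--
--     # if the parenthesis stack is not empty, then the sentence is invalid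
--     raise ValueError("Invalid sentence: " + " ".join(sentence))
-- ===== SOURCE B (Python) =====
-- def get_following_operand(sentence: list[str], index: int) -> tuple[int, int]:
--     """Iterative version: skip leading '~' with a cursor, then match the
--     parenthesised group with an integer depth counter."""
--     pos = index + 1
--     # skip any leading negations; the operand begins right after the operator
--     while sentence[pos] == '~':
--         pos += 1
--
--     # a non-parenthesised operand is a single token
--     if sentence[pos] != '(':
--         return index + 1, pos
--
--     depth = 0
--     for i in range(pos, len(sentence)):
--         c = sentence[i]
--         if c == '(':
--             depth += 1
--         elif c == ')' and depth > 0: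
--             depth -= 1
--         if depth == 0:
--             return index + 1, i
--
--     raise ValueError("Invalid sentence: " + " ".join(sentence))
-- ===== Notes on version B (the rewrite author's own statement) =====
-- stated objective: simpler
-- what changed: A's recursion over leading '~' tokens is replaced by an iterative cursor, and A's parenthesis index-stack (a list built and popped) by a plain integer depth counter.
import Mathlib
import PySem

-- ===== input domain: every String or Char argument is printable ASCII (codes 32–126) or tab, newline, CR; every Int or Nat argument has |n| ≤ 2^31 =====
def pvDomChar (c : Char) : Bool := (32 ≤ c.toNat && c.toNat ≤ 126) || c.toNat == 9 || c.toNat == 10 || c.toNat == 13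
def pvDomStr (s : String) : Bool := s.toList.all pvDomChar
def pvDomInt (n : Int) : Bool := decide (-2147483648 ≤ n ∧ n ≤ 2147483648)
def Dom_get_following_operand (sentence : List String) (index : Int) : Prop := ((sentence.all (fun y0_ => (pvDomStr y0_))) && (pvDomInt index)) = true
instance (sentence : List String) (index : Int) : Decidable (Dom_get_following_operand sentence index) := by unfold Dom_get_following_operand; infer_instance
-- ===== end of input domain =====

-- B replaces A's recursion over leading '~' by an iterative cursor and A's
-- parenthesis index-stack by an integer depth counter (objective: simpler).
-- Where Python A raises (IndexError past the end, ValueError on unbalanced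
-- parentheses) B raises the same exceptions; those inputs are outside Pre_.

-- used by the ports' termination proofs (cited in decreasing_by)
theorem pyGet?_some_lt_len {α : Type} {xs : List α} {i : Int} {x : α}
    (h : PySem.List.pyGet? xs i = some x) : i < (xs.length : Int) := by
  by_contra hc
  have hn : PySem.List.pyGet? xs i = none := by
    rw [PySem.List.pyGet?_eq_none_iff]
    intro hr
    exact hc hr.2
  rw [h] at hn
  simp at hn

-- ===== PORT A =====

-- A's for-loop over range(index+1, len(sentence)) with the index stack;
-- `none` = the loop runs out (Python then raises ValueError).
def scanStack (s : List String) (i : Int) (stack : List Int) : Option Int :=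
  if h : i < (s.length : Int) then
    let stack' :=
      if PySem.List.pyGet? s i = some "(" then i :: stack
      else if PySem.List.pyGet? s i = some ")" then
        (if stack.length > 0 then stack.tail else stack)
      else stack
    if stack'.length = 0 then some i else scanStack s (i + 1) stack'
  else none
termination_by ((s.length : Int) - i).toNat
decreasing_by omega

def get_following_operand (sentence : List String) (index : Int) : Int × Int :=
  match h : PySem.List.pyGet? sentence (index + 1) with
  | none => (0, 0)   -- Python raises IndexError here (outside Pre_)
  | some x =>
    if x = "~" then
      (index + 1, (get_following_operand sentence (index + 1)).2)
    else if x ≠ "(" then (index + 1, index + 1)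
    else
      match scanStack sentence (index + 1) [] with
      | some e => (index + 1, e)
      | none => (0, 0)   -- Python raises ValueError here (outside Pre_)
termination_by ((sentence.length : Int) - index).toNat
decreasing_by have := pyGet?_some_lt_len h; omega

-- ===== PORT B =====

-- the while loop skipping leading '~'; stops at the first non-'~' position
-- (a position past the end is Python's IndexError, re-detected by the caller)
def skipTilde (s : List String) (pos : Int) : Int :=
  if h : PySem.List.pyGet? s pos = some "~" then skipTilde s (pos + 1) else pos
termination_by ((s.length : Int) - pos).toNat
decreasing_by have := pyGet?_some_lt_len h; omega

-- B's for-loop with the integer depth counter; `none` = ValueError in Python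
def scanDepth (s : List String) (i : Int) (depth : Int) : Option Int :=
  if h : i < (s.length : Int) then
    let depth' :=
      if PySem.List.pyGet? s i = some "(" then depth + 1
      else if PySem.List.pyGet? s i = some ")" ∧ depth > 0 then depth - 1
      else depth
    if depth' = 0 then some i else scanDepth s (i + 1) depth'
  else none
termination_by ((s.length : Int) - i).toNat
decreasing_by omega

def get_following_operand_alt (sentence : List String) (index : Int) : Int × Int :=
  let pos := skipTilde sentence (index + 1)
  match PySem.List.pyGet? sentence pos with
  | none => (0, 0)   -- Python's while loop raised IndexError (outside Pre_)
  | some x =>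
    if x ≠ "(" then (index + 1, pos)
    else
      match scanDepth sentence pos 0 with
      | some e => (index + 1, e)
      | none => (0, 0)   -- Python raises ValueError here (outside Pre_)

-- ===== PRECONDITION & SPEC =====
-- Pre_ = exactly the inputs on which Python A returns: index+1 is a valid
-- (possibly negative) index, the chain of '~' tokens stops at some in-range
-- position p, and if the token at p is '(' the parenthesis counts balance at
-- some later position (otherwise A raises IndexError resp. ValueError).
def Pre_get_following_operand (sentence : List String) (index : Int) : Prop :=
  -(sentence.length : Int) ≤ index + 1 ∧
  ∃ p ∈ PySem.List.pyRange (index + 1) (sentence.length : Int) 1,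
    (∀ q ∈ PySem.List.pyRange (index + 1) p 1, PySem.List.pyGet? sentence q = some "~") ∧
    PySem.List.pyGet? sentence p ≠ some "~" ∧
    (PySem.List.pyGet? sentence p = some "(" →
      ∃ j ∈ PySem.List.pyRange p (sentence.length : Int) 1,
        (PySem.List.pyRange p (j + 1) 1).countP
            (fun q => PySem.List.pyGet? sentence q == some "(")
          = (PySem.List.pyRange p (j + 1) 1).countP
            (fun q => PySem.List.pyGet? sentence q == some ")"))
instance (sentence : List String) (index : Int) : Decidable (Pre_get_following_operand sentence index) := by unfold Pre_get_following_operand; infer_instance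

def pvWitness_get_following_operand : List String × Int := (["p", "&", "q"], 1)

def Spec_get_following_operand (sentence : List String) (index : Int) (out : Int × Int) : Prop := out = get_following_operand_alt sentence index
instance (sentence : List String) (index : Int) (out : Int × Int) : Decidable (Spec_get_following_operand sentence index out) := by unfold Spec_get_following_operand; infer_instance

-- ===== CLAIM (what is proved, stated in full; the proofs are below) =====
def Claim_equal_get_following_operand : Prop := ∀ (sentence : List String) (index : Int), Dom_get_following_operand sentence index → Pre_get_following_operand sentence index → Spec_get_following_operand sentence index (get_following_operand sentence index)

-- ===== LEMMAS AND PROOFS =====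

theorem pyGet?_some_of_inrange {α : Type} (xs : List α) (i : Int)
    (h1 : -(xs.length : Int) ≤ i) (h2 : i < (xs.length : Int)) :
    ∃ x, PySem.List.pyGet? xs i = some x := by
  rw [← Option.isSome_iff_exists, ← Option.ne_none_iff_isSome, Ne,
    PySem.List.pyGet?_eq_none_iff]
  intro hn
  exact hn ⟨h1, h2⟩

-- the value both programs put in the second component once the first
-- non-'~' position p is known (getD 0 is only read under scan success)
def opEnd (s : List String) (p : Int) : Int :=
  if PySem.List.pyGet? s p = some "(" then (scanDepth s p 0).getD 0 else p

-- parenthesis balance of the tokens at positions a..b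
def parBal (s : List String) (a b : Int) : Int :=
  ((PySem.List.pyRange a (b + 1) 1).countP
      (fun q => PySem.List.pyGet? s q == some "(") : Int)
    - ((PySem.List.pyRange a (b + 1) 1).countP
      (fun q => PySem.List.pyGet? s q == some ")") : Int)

theorem parBal_cons (s : List String) (a b : Int) (h : a ≤ b) :
    parBal s a b
      = ((if PySem.List.pyGet? s a = some "(" then 1 else 0)
          - (if PySem.List.pyGet? s a = some ")" then 1 else 0))
        + parBal s (a + 1) b := by
  unfold parBal
  rw [PySem.List.pyRange_one_cons (by omega : a < b + 1)]
  simp only [List.countP_cons]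
  push_cast
  by_cases h1 : PySem.List.pyGet? s a = some "("
  · simp [h1]; ring
  · by_cases h2 : PySem.List.pyGet? s a = some ")"
    · simp [h2]; ring
    · simp [h1, h2]

theorem parBal_self (s : List String) (a : Int) :
    parBal s a a
      = (if PySem.List.pyGet? s a = some "(" then 1 else 0)
        - (if PySem.List.pyGet? s a = some ")" then 1 else 0) := by
  have h := parBal_cons s a a le_rfl
  have h0 : parBal s (a + 1) a = 0 := by
    unfold parBal
    rw [PySem.List.pyRange_one_eq_nil (by omega)]
    simp
  omega

-- A's stack scan and B's depth scan agree: only the stack's LENGTH matters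
theorem scan_eq (s : List String) (i : Int) (stack : List Int) :
    scanStack s i stack = scanDepth s i (stack.length : Int) := by
  rw [scanStack, scanDepth]
  by_cases h : i < (s.length : Int)
  · simp only [dif_pos h]
    by_cases h1 : PySem.List.pyGet? s i = some "("
    · rw [if_pos h1, if_pos h1]
      rw [if_neg (by simp : ¬ (i :: stack).length = 0),
        if_neg (by omega : ¬ ((stack.length : Int) + 1 = 0)),
        scan_eq s (i + 1) (i :: stack)]
      have hl : ((i :: stack).length : Int) = (stack.length : Int) + 1 := by simp
      rw [hl]
    · by_cases h2 : PySem.List.pyGet? s i = some ")"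
      · rw [if_neg h1, if_neg h1, if_pos h2]
        by_cases hst : stack.length > 0
        · rw [if_pos hst,
            if_pos (⟨h2, by exact_mod_cast hst⟩ :
              PySem.List.pyGet? s i = some ")" ∧ (stack.length : Int) > 0)]
          have hl : (stack.tail.length : Int) = (stack.length : Int) - 1 := by
            rw [List.length_tail]; omega
          by_cases h0 : stack.tail.length = 0
          · rw [if_pos h0, if_pos (by omega)]
          · rw [if_neg h0, if_neg (by omega), scan_eq s (i + 1) stack.tail, hl]
        · rw [if_neg hst,
            if_neg (fun hh => hst (by exact_mod_cast hh.2) :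
              ¬ (PySem.List.pyGet? s i = some ")" ∧ (stack.length : Int) > 0))]
          by_cases h0 : stack.length = 0
          · rw [if_pos h0, if_pos (by omega)]
          · rw [if_neg h0, if_neg (by omega), scan_eq s (i + 1) stack]
      · rw [if_neg h1, if_neg h1, if_neg h2,
          if_neg (fun hh => h2 hh.1 :
            ¬ (PySem.List.pyGet? s i = some ")" ∧ (stack.length : Int) > 0))]
        by_cases h0 : stack.length = 0
        · rw [if_pos h0, if_pos (by omega)]
        · rw [if_neg h0, if_neg (by omega), scan_eq s (i + 1) stack]
  · simp only [dif_neg h]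
termination_by ((s.length : Int) - i).toNat
decreasing_by all_goals omega

-- B's depth scan succeeds whenever the balance closes somewhere in range
theorem scanDepth_isSome (s : List String) (i depth : Int)
    (hd : 0 ≤ depth)
    (hex : ∃ j, i ≤ j ∧ j < (s.length : Int) ∧ depth + parBal s i j = 0) :
    (scanDepth s i depth).isSome := by
  obtain ⟨j, hij, hjn, hbal⟩ := hex
  rw [scanDepth]
  have hi : i < (s.length : Int) := by omega
  simp only [dif_pos hi]
  have hself := parBal_self s i
  by_cases h1 : PySem.List.pyGet? s i = some "("
  · rw [if_pos h1]
    rw [h1] at hself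
    simp at hself
    by_cases h0 : depth + 1 = 0
    · simp [h0]
    · rw [if_neg h0]
      have hne : i ≠ j := by intro he; rw [← he] at hbal; omega
      have hstep := parBal_cons s i j hij
      rw [h1] at hstep
      simp at hstep
      exact scanDepth_isSome s (i + 1) (depth + 1) (by omega)
        ⟨j, by omega, hjn, by omega⟩
  · by_cases h2 : PySem.List.pyGet? s i = some ")"
    · rw [if_neg h1]
      rw [h2] at hself
      simp at hself
      by_cases h3 : depth > 0
      · rw [if_pos (show PySem.List.pyGet? s i = some ")" ∧ depth > 0 from ⟨h2, h3⟩)]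
        by_cases h0 : depth - 1 = 0
        · rw [if_pos h0]
          simp
        · rw [if_neg h0]
          have hne : i ≠ j := by intro he; rw [← he] at hbal; omega
          have hstep := parBal_cons s i j hij
          rw [h2] at hstep
          simp at hstep
          exact scanDepth_isSome s (i + 1) (depth - 1) (by omega)
            ⟨j, by omega, hjn, by omega⟩
      · rw [if_neg (show ¬ (PySem.List.pyGet? s i = some ")" ∧ depth > 0) from
          fun hh => h3 hh.2)]
        rw [if_pos (show depth = 0 by omega)]
        simp
    · rw [if_neg h1,
        if_neg (show ¬ (PySem.List.pyGet? s i = some ")" ∧ depth > 0) from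
          fun hh => h2 hh.1)]
      by_cases h0 : depth = 0
      · rw [if_pos h0]
        simp
      · rw [if_neg h0]
        have hne : i ≠ j := by
          intro he
          rw [← he, hself] at hbal
          simp [h1, h2] at hbal
          omega
        have hstep := parBal_cons s i j hij
        simp [h1, h2] at hstep
        exact scanDepth_isSome s (i + 1) depth (by omega)
          ⟨j, by omega, hjn, by omega⟩
termination_by ((s.length : Int) - i).toNat
decreasing_by all_goals omega

-- the '~'-skipping cursor stops exactly at the first non-'~' position
theorem skipTilde_to (s : List String) (a p : Int) (hap : a ≤ p)
    (hall : ∀ q, a ≤ q → q < p → PySem.List.pyGet? s q = some "~")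
    (hp : PySem.List.pyGet? s p ≠ some "~") :
    skipTilde s a = p := by
  rw [skipTilde]
  by_cases he : a = p
  · subst he
    rw [dif_neg hp]
  · have ha : PySem.List.pyGet? s a = some "~" := hall a le_rfl (by omega)
    rw [dif_pos ha]
    exact skipTilde_to s (a + 1) p (by omega)
      (fun q h1 h2 => hall q (by omega) h2) hp
termination_by (p - a).toNat
decreasing_by omega

-- A's recursion over the '~' chain yields (index+1, opEnd s p)
theorem portA_eq (s : List String) (index p : Int)
    (hap : index + 1 ≤ p) (hlt : p < (s.length : Int))
    (hge : -(s.length : Int) ≤ index + 1)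
    (hall : ∀ q, index + 1 ≤ q → q < p → PySem.List.pyGet? s q = some "~")
    (hp : PySem.List.pyGet? s p ≠ some "~")
    (hsc : PySem.List.pyGet? s p = some "(" → (scanDepth s p 0).isSome) :
    get_following_operand s index = (index + 1, opEnd s p) := by
  rw [get_following_operand]
  by_cases he : index + 1 = p
  · obtain ⟨x, hx⟩ := pyGet?_some_of_inrange s (index + 1) hge (by omega)
    rw [hx]
    simp only []
    have hx' : PySem.List.pyGet? s p = some x := by rw [← he]; exact hx
    have hxne : ¬ x = "~" := by
      intro hh; exact hp (by rw [hx', hh])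
    rw [if_neg hxne]
    by_cases hpar : x = "("
    · subst hpar
      rw [if_neg (by simp)]
      obtain ⟨e, he'⟩ := Option.isSome_iff_exists.mp (hsc hx')
      rw [scan_eq s (index + 1) [], he]
      simp only [List.length_nil, Nat.cast_zero]
      rw [he']
      simp [opEnd, hx', he']
    · rw [if_pos hpar]
      unfold opEnd
      rw [if_neg (by rw [hx']; simpa using hpar), he]
  · have h1 : PySem.List.pyGet? s (index + 1) = some "~" :=
      hall (index + 1) le_rfl (by omega)
    rw [h1]
    have ih := portA_eq s (index + 1) p (by omega) hlt (by omega)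
      (fun q hq1 hq2 => hall q (by omega) hq2) hp hsc
    simp [ih]
termination_by (p - index).toNat
decreasing_by omega

-- B, via the cursor, yields the same pair
theorem portB_eq (s : List String) (index p : Int)
    (hap : index + 1 ≤ p) (hlt : p < (s.length : Int))
    (hge : -(s.length : Int) ≤ index + 1)
    (hall : ∀ q, index + 1 ≤ q → q < p → PySem.List.pyGet? s q = some "~")
    (hp : PySem.List.pyGet? s p ≠ some "~")
    (hsc : PySem.List.pyGet? s p = some "(" → (scanDepth s p 0).isSome) :
    get_following_operand_alt s index = (index + 1, opEnd s p) := by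
  unfold get_following_operand_alt
  have hskip : skipTilde s (index + 1) = p :=
    skipTilde_to s (index + 1) p hap (fun q h1 h2 => hall q h1 h2) hp
  rw [hskip]
  simp only []
  obtain ⟨x, hx⟩ := pyGet?_some_of_inrange s p (by omega) hlt
  rw [hx]
  simp only []
  by_cases hpar : x = "("
  · subst hpar
    rw [if_neg (by simp)]
    obtain ⟨e, he'⟩ := Option.isSome_iff_exists.mp (hsc hx)
    rw [he']
    simp [opEnd, hx, he']
  · rw [if_pos hpar]
    unfold opEnd
    rw [if_neg (by rw [hx]; simpa using hpar)]

-- ===== VERDICT (by name: the statement is the Claim_ definition above) =====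
theorem get_following_operand_spec : Claim_equal_get_following_operand := by
  intro s index _ hpre
  obtain ⟨hge, p, hpmem, hall, hp, hbal⟩ := hpre
  rw [PySem.List.mem_pyRange_one] at hpmem
  have hall' : ∀ q, index + 1 ≤ q → q < p → PySem.List.pyGet? s q = some "~" := by
    intro q h1 h2
    exact hall q (PySem.List.mem_pyRange_one.mpr ⟨h1, h2⟩)
  have hsc : PySem.List.pyGet? s p = some "(" → (scanDepth s p 0).isSome := by
    intro hpar
    obtain ⟨j, hjmem, hcnt⟩ := hbal hpar
    rw [PySem.List.mem_pyRange_one] at hjmem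
    apply scanDepth_isSome s p 0 le_rfl
    refine ⟨j, hjmem.1, hjmem.2, ?_⟩
    unfold parBal
    omega
  have hA := portA_eq s index p hpmem.1 hpmem.2 hge hall' hp hsc
  have hB := portB_eq s index p hpmem.1 hpmem.2 hge hall' hp hsc
  unfold Spec_get_following_operand
  rw [hA, hB]
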